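-- pv_equiv track=rewrite | github.com/Azura-yuwi/6.1210-Work | find_meeting_point.py | find_meeting_point
-- ===== SOURCE A (Python) =====
-- def dfs(Adj, s, parent = None, order = None): #given by template
--     if parent is None:
--         parent = [None for v in Adj]
--         order = []
--         parent[s] = s
--     for v in Adj[s]:
--         if parent[v] is None:
--             parent[v] = s
--             dfs(Adj, v, parent, order)
--     order.append(s)
--     return parent, order
--
-- def full_dfs(Adj): #given by template
--     parent = [None for v in Adj]
--     order = []
--     for v in range(len(Adj)):
--         if parent[v] is None:
--             parent[v] = v
--             dfs(Adj, v, parent, order)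
--     return parent, order
--
-- def find_meeting_point(Adj):
--     '''
--     inputs:
--         Adj - an adjacency list such as [[1,2], [2], []]
--     return a meeting point or None if no meeting points exist
--     '''
--
--     # reverse the edges
--     revAdj = [[] for v in Adj]
--     for v in range(len(Adj)):
--         for s in Adj[v]:
--             revAdj[s].append(v)
--
--     p, ord = full_dfs(revAdj)
--     last = ord[len(ord)-1]
--
--     np, nord = dfs(revAdj, last)
--     work = True
--
--     for v in range(len(Adj)):
--         if np[v] is None:
--             work = False
--
--     if work:
--         return last
--
--     return None
-- ===== SOURCE B (Python) =====
-- def find_meeting_point(Adj):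
--     '''
--     inputs:
--         Adj - an adjacency list such as [[1,2], [2], []]
--     return a meeting point or None if no meeting points exist
--     '''
--     n = len(Adj)
--
--     # reverse the edges
--     revAdj = [[] for _ in Adj]
--     for v in range(n):
--         for s in Adj[v]:
--             revAdj[s].append(v)
--
--     # last root of a DFS forest over revAdj = candidate meeting point,
--     # found with iterative traversals instead of recursion
--     visited = [False] * n
--     last = -1
--     for v in range(n):
--         if not visited[v]:
--             last = v
--             visited[v] = True
--             stack = [v]
--             while stack:
--                 u = stack.pop()
--                 for w in revAdj[u]:
--                     if not visited[w]:
--                         visited[w] = True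
--                         stack.append(w)
--     if last == -1:
--         return None
--
--     # check that every vertex reaches `last` (i.e. last reaches all in revAdj)
--     seen = [False] * n
--     seen[last] = True
--     stack = [last]
--     while stack:
--         u = stack.pop()
--         for w in revAdj[u]:
--             if not seen[w]:
--                 seen[w] = True
--                 stack.append(w)
--     return last if all(seen) else None
-- ===== Notes on version B (the rewrite author's own statement) =====
-- stated objective: alternative
-- what changed: The recursive finish-order DFS with parent arrays is replaced by iterative stack traversals over a boolean visited array: the last DFS root is computed directly by the scan, and the final reachability check uses an explicit stack and all(seen) instead of a second recursive DFS with a parent array.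
import Mathlib
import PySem

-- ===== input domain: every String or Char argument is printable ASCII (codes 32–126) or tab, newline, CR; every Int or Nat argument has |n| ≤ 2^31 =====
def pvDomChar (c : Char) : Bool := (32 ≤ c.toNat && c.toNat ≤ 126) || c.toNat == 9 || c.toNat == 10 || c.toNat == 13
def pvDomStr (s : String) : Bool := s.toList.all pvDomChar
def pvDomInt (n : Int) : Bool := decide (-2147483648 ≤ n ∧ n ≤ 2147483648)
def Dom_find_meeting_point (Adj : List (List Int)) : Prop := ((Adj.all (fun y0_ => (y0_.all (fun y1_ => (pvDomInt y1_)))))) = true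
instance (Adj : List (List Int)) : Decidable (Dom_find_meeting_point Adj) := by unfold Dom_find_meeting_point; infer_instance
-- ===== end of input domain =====

-- B replaces A's recursive finish-order DFS and parent arrays with iterative stack
-- traversals over a boolean visited array, computing the last DFS root directly
-- (objective: alternative decomposition, same asymptotic cost).

-- ===== PORT A =====

-- Python list index normalisation: exact for -n ≤ i < n (out-of-range indexing raises
-- in Python and is excluded by Pre_).
def pidx (n : Nat) (i : Int) : Nat := (if i < 0 then i + n else i).toNat

-- the edge-reversal loop, textually identical in Source A and Source B, shared by both ports
def revEdges (Adj : List (List Int)) : List (List Int) :=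
  (List.range Adj.length).foldl
    (fun r v => (Adj.getD v []).foldl
      (fun r s => r.set (pidx Adj.length s) (r.getD (pidx Adj.length s) [] ++ [(v : Int)])) r)
    (List.replicate Adj.length ([] : List Int))

-- recursive dfs of Source A: dfsAV = the body of dfs(Adj,s,parent,order) (neighbour loop,
-- then order.append(s)); dfsAL = the neighbour loop.  fuel only makes the recursion
-- total in Lean; it is proved never to run out on admitted inputs.
mutual
def dfsAV (adj : List (List Int)) (fuel : Nat) (s : Nat)
    (st : List (Option Int) × List Int) : List (Option Int) × List Int :=
  let st' := dfsAL adj fuel s (adj.getD s []) st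
  (st'.1, st'.2 ++ [(s : Int)])
termination_by (fuel, (adj.getD s []).length + 1)
def dfsAL (adj : List (List Int)) (fuel : Nat) (s : Nat) (nbs : List Int)
    (st : List (Option Int) × List Int) : List (Option Int) × List Int :=
  match nbs with
  | [] => st
  | v :: rest =>
    let vn := pidx st.1.length v
    if st.1.getD vn (some 0) = none then
      match fuel with
      | 0 => st
      | f + 1 => dfsAL adj (f + 1) s rest (dfsAV adj f vn (st.1.set vn (some (s : Int)), st.2))
    else dfsAL adj fuel s rest st
termination_by (fuel, nbs.length)
end

-- full_dfs of Source A
def fullDfsA (adj : List (List Int)) : List (Option Int) × List Int :=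
  (List.range adj.length).foldl
    (fun st v =>
      if st.1.getD v (some 0) = none then
        dfsAV adj (adj.length + 1) v (st.1.set v (some (v : Int)), st.2)
      else st)
    (List.replicate adj.length (none : Option Int), ([] : List Int))

-- the top-level call dfs(revAdj, last) of Source A (parent created, parent[s] = s)
def dfsATop (adj : List (List Int)) (s : Nat) : List (Option Int) × List Int :=
  dfsAV adj (adj.length + 1) s
    ((List.replicate adj.length (none : Option Int)).set s (some (s : Int)), [])

def find_meeting_point (Adj : List (List Int)) : Option Int :=
  let n := Adj.length
  let revAdj := revEdges Adj
  let po := fullDfsA revAdj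
  match po.2.getLast? with
  | none => none   -- Python raises IndexError here (ord empty ⇔ Adj = []); excluded by Pre_
  | some last =>
    let np := (dfsATop revAdj (pidx n last)).1
    let work := (List.range n).foldl
      (fun w v => if np.getD v (some 0) = none then false else w) true
    if work then some last else none

-- ===== PORT B =====

-- iterative stack traversal of Source B (the while-stack loop); the Lean stack has its top
-- at the head (Python appends/pops at the end).  fuel as above.
def stackB (adj : List (List Int)) : Nat → List Int → List Bool → List Bool
  | _, [], vis => vis
  | 0, _ :: _, vis => vis
  | f + 1, u :: stk, vis =>
    let p := (adj.getD (pidx vis.length u) []).foldl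
      (fun (p : List Bool × List Int) w =>
        let wn := pidx p.1.length w
        if p.1.getD wn true = false then (p.1.set wn true, w :: p.2) else p)
      (vis, stk)
    stackB adj f p.2 p.1

def find_meeting_point_alt (Adj : List (List Int)) : Option Int :=
  let n := Adj.length
  let revAdj := revEdges Adj
  let scan := (List.range n).foldl
    (fun (p : List Bool × Int) v =>
      if p.1.getD v true = false then
        (stackB revAdj (n + 2) [(v : Int)] (p.1.set v true), (v : Int))
      else p)
    (List.replicate n false, (-1 : Int))
  if scan.2 = -1 then none
  else
    let seen := stackB revAdj (n + 2) [scan.2] ((List.replicate n false).set (pidx n scan.2) true)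
    if seen.all (fun b => b) then some scan.2 else none

-- ===== PRECONDITION & SPEC =====
-- Pre_ = exactly the inputs on which Python A returns: on empty Adj A raises
-- IndexError (ord[-1] on the empty finish order), and an id outside [-n, n)
-- raises IndexError in revAdj[s]; ids in [-n, 0) wrap (Python negative indexing)
-- identically in both programs and stay inside the claim.
def Pre_find_meeting_point (Adj : List (List Int)) : Prop :=
  Adj ≠ [] ∧ ∀ l ∈ Adj, ∀ e ∈ l, -(Adj.length : Int) ≤ e ∧ e < (Adj.length : Int)
instance (Adj : List (List Int)) : Decidable (Pre_find_meeting_point Adj) := by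
  unfold Pre_find_meeting_point; infer_instance

def pvWitness_find_meeting_point : List (List Int) := [[1, 2], [2], [0]]

def Spec_find_meeting_point (Adj : List (List Int)) (out : Option Int) : Prop :=
  out = find_meeting_point_alt Adj
instance (Adj : List (List Int)) (out : Option Int) : Decidable (Spec_find_meeting_point Adj out) := by
  unfold Spec_find_meeting_point; infer_instance

-- ===== CLAIM =====
def Claim_equal_find_meeting_point : Prop :=
  ∀ (Adj : List (List Int)), Dom_find_meeting_point Adj → Pre_find_meeting_point Adj →
    Spec_find_meeting_point Adj (find_meeting_point Adj)

-- ===== LEMMAS AND PROOFS =====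

-- ===== proof-side notions =====
def MA (p : List (Option Int)) (v : Nat) : Bool := (p.getD v none).isSome
def MB (vis : List Bool) (v : Nat) : Bool := vis.getD v false
def ncA (p : List (Option Int)) : Nat := p.countP (fun o => o.isNone)
def fcB (vis : List Bool) : Nat := vis.countP (fun b => !b)

def WfAdj (adj : List (List Int)) (n : Nat) : Prop :=
  adj.length = n ∧ ∀ u : Nat, ∀ e ∈ adj.getD u [], 0 ≤ e ∧ e < (n : Int)

inductive Reach (adj : List (List Int)) (m : Nat → Bool) (r : Nat) : Nat → Prop
  | refl : Reach adj m r r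
  | step {u v : Nat} : Reach adj m r u → m u = false → ((v : Int) ∈ adj.getD u []) →
      Reach adj m r v

lemma pidx_nonneg (n : Nat) (i : Int) (h : 0 ≤ i) : pidx n i = i.toNat := by
  simp [pidx, not_lt.mpr h]
lemma countP_set' {α} (q : α → Bool) :
    ∀ (l : List α) (i : Nat) (a d : α), i < l.length →
      l.countP q + (if q a then 1 else 0) =
        (l.set i a).countP q + (if q (l.getD i d) then 1 else 0) := by
  intro l
  induction l with
  | nil => intro i a d h; simp at h
  | cons b t ih =>
    intro i a d h
    cases i with
    | zero =>
      simp only [List.set_cons_zero, List.countP_cons, List.getD_cons_zero]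
      by_cases hb : q b = true <;> by_cases ha : q a = true <;> simp [hb, ha]
    | succ j =>
      simp only [List.set_cons_succ, List.countP_cons, List.getD_cons_succ]
      have := ih j a d (by simpa using h)
      simp only [List.getD] at this
      by_cases hb : q b = true <;> simp [hb, List.getD] <;> omega

lemma getD_set {α} (l : List α) (i j : Nat) (x d : α) :
    (l.set i x).getD j d = if i = j ∧ i < l.length then x else l.getD j d := by
  by_cases hj : j < l.length
  · rw [List.getD_eq_getElem _ _ (by simpa using hj), List.getD_eq_getElem _ _ hj,
      List.getElem_set]
    by_cases hij : i = j
    · subst hij; simp [hj]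
    · simp [hij]
  · rw [List.getD_eq_default _ _ (by simpa using not_lt.mp hj),
      List.getD_eq_default _ _ (not_lt.mp hj)]
    have hne : ¬(i = j ∧ i < l.length) := by rintro ⟨rfl, h⟩; exact hj h
    simp [hne]

lemma MA_get (p : List (Option Int)) (v : Nat) (hv : v < p.length) : MA p v = p[v].isSome := by
  rw [MA, List.getD_eq_getElem _ _ hv]

lemma MB_get (vis : List Bool) (v : Nat) (hv : v < vis.length) : MB vis v = vis[v] := by
  rw [MB, List.getD_eq_getElem _ _ hv]

lemma MA_oob (p : List (Option Int)) (v : Nat) (hv : p.length ≤ v) : MA p v = false := by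
  rw [MA, List.getD_eq_default _ _ hv]; rfl

lemma MA_set (p : List (Option Int)) (i : Nat) (x : Int) (v : Nat) :
    MA (p.set i (some x)) v = if i = v ∧ i < p.length then true else MA p v := by
  rw [MA, getD_set]
  by_cases h : i = v ∧ i < p.length
  · rw [if_pos h, if_pos h]; rfl
  · rw [if_neg h, if_neg h]; rfl

lemma MB_set (vis : List Bool) (i v : Nat) :
    MB (vis.set i true) v = if i = v ∧ i < vis.length then true else MB vis v := by
  rw [MB, getD_set]
  by_cases h : i = v ∧ i < vis.length
  · rw [if_pos h, if_pos h]
  · rw [if_neg h, if_neg h]; rfl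

lemma MA_replicate (n v : Nat) : MA (List.replicate n (none : Option Int)) v = false := by
  by_cases h : v < n
  · rw [MA_get _ _ (by simpa using h)]; simp
  · exact MA_oob _ _ (by simpa using not_lt.mp h)

lemma MB_replicate (n v : Nat) : MB (List.replicate n false) v = false := by
  by_cases h : v < n
  · rw [MB_get _ _ (by simpa using h)]; simp
  · rw [MB, List.getD_eq_default _ _ (by simpa using not_lt.mp h)]

lemma ncA_le (p : List (Option Int)) : ncA p ≤ p.length := List.countP_le_length

lemma guardA_iff (p : List (Option Int)) (v : Nat) :
    p.getD v (some 0) = none ↔ (v < p.length ∧ MA p v = false) := by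
  by_cases hv : v < p.length
  · rw [List.getD_eq_getElem _ _ hv, MA_get _ _ hv]
    cases h : p[v] <;> simp [hv, h]
  · rw [List.getD_eq_default _ _ (not_lt.mp hv)]
    simp [hv]

lemma guardB_iff (vis : List Bool) (v : Nat) :
    vis.getD v true = false ↔ (v < vis.length ∧ MB vis v = false) := by
  by_cases hv : v < vis.length
  · rw [List.getD_eq_getElem _ _ hv, MB_get _ _ hv]
    simp [hv]
  · rw [List.getD_eq_default _ _ (not_lt.mp hv)]
    simp [hv]

lemma ncA_mono : ∀ (p q : List (Option Int)), q.length = p.length →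
    (∀ v, MA p v = true → MA q v = true) → ncA q ≤ ncA p := by
  intro p
  induction p with
  | nil =>
    intro q hl _
    obtain rfl : q = [] := List.length_eq_zero_iff.mp (by simpa using hl)
    exact le_refl _
  | cons a t ih =>
    intro q hl h
    cases q with
    | nil => simp [ncA]
    | cons b s =>
      have ht : ncA s ≤ ncA t := ih s (by simpa using hl) fun v hv => h (v + 1) hv
      have hh : b.isNone = true → a.isNone = true := by
        intro hb
        cases a with
        | none => rfl
        | some x =>
          have := h 0 (by rw [MA_get _ _ (by simp)]; rfl)
          rw [MA_get _ _ (by simp)] at this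
          simp only [List.getElem_cons_zero] at this
          cases b with
          | none => simp at this
          | some y => simp at hb
      simp only [ncA, List.countP_cons] at ht ⊢
      cases hb : b.isNone <;> cases ha : a.isNone <;> simp_all <;> omega

lemma ncA_set_lt (p : List (Option Int)) (i : Nat) (x : Int)
    (hi : i < p.length) (h : p.getD i none = none) :
    ncA (p.set i (some x)) < ncA p := by
  have hc := countP_set' (fun o => o.isNone) p i (some x) none hi
  simp only [h] at hc
  simp only [ncA] at *
  simp at hc
  omega

lemma fcB_set (vis : List Bool) (i : Nat)
    (hi : i < vis.length) (h : vis.getD i false = false) :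
    fcB (vis.set i true) + 1 = fcB vis := by
  have hc := countP_set' (fun b => !b) vis i true false hi
  simp only [h] at hc
  simp only [fcB] at *
  simp at hc
  omega

lemma wf_edge {adj : List (List Int)} {n : Nat} (hwf : WfAdj adj n)
    {u : Nat} {e : Int} (he : e ∈ adj.getD u []) :
    0 ≤ e ∧ e < (n : Int) := hwf.2 u e he

lemma wf_edge_toNat {adj : List (List Int)} {n : Nat} (hwf : WfAdj adj n)
    {u : Nat} {e : Int} (he : e ∈ adj.getD u []) :
    e.toNat < n ∧ ((e.toNat : Nat) : Int) = e := by
  obtain ⟨h0, h1⟩ := wf_edge hwf he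
  omega

lemma dfsAV_def (adj : List (List Int)) (fuel : Nat) (s : Nat) (st : List (Option Int) × List Int) :
    dfsAV adj fuel s st = ((dfsAL adj fuel s (adj.getD s []) st).1,
      (dfsAL adj fuel s (adj.getD s []) st).2 ++ [(s : Int)]) := by
  rw [dfsAV]

lemma dfsAL_nil (adj : List (List Int)) (fuel : Nat) (s : Nat) (st : List (Option Int) × List Int) :
    dfsAL adj fuel s [] st = st := by rw [dfsAL.eq_def]

lemma dfsAL_cons_marked (adj : List (List Int)) (fuel : Nat) (s : Nat) (v : Int) (rest : List Int)
    (st : List (Option Int) × List Int) (hg : ¬ st.1.getD (pidx st.1.length v) (some 0) = none) :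
    dfsAL adj fuel s (v :: rest) st = dfsAL adj fuel s rest st := by
  rw [dfsAL.eq_def]
  dsimp only
  exact if_neg hg

lemma dfsAL_cons_new (adj : List (List Int)) (f : Nat) (s : Nat) (v : Int) (rest : List Int)
    (st : List (Option Int) × List Int) (hg : st.1.getD (pidx st.1.length v) (some 0) = none) :
    dfsAL adj (f + 1) s (v :: rest) st = dfsAL adj (f + 1) s rest
      (dfsAV adj f (pidx st.1.length v) (st.1.set (pidx st.1.length v) (some (s : Int)), st.2)) := by
  rw [dfsAL.eq_def]
  dsimp only
  rw [if_pos hg]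

lemma dfsAL_cons_zero (adj : List (List Int)) (s : Nat) (v : Int) (rest : List Int)
    (st : List (Option Int) × List Int) (hg : st.1.getD (pidx st.1.length v) (some 0) = none) :
    dfsAL adj 0 s (v :: rest) st = st := by
  rw [dfsAL.eq_def]
  dsimp only
  rw [if_pos hg]
-- growth of the parent array
def Grow (p q : List (Option Int)) : Prop :=
  q.length = p.length ∧ ∀ v, MA p v = true → MA q v = true

lemma grow_refl (p : List (Option Int)) : Grow p p := ⟨rfl, fun _ h => h⟩

lemma grow_trans {p q r : List (Option Int)} (h1 : Grow p q) (h2 : Grow q r) : Grow p r :=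
  ⟨h2.1.trans h1.1, fun v hv => h2.2 v (h1.2 v hv)⟩

lemma grow_set (p : List (Option Int)) (i : Nat) (x : Int) : Grow p (p.set i (some x)) := by
  refine ⟨List.length_set .., fun v hv => ?_⟩
  rw [MA_set]
  split
  · rfl
  · exact hv

lemma dfsA_grow (adj : List (List Int)) : ∀ fuel : Nat,
    (∀ (s : Nat) (nbs : List Int) (st : List (Option Int) × List Int),
      Grow st.1 (dfsAL adj fuel s nbs st).1) ∧
    (∀ (s : Nat) (st : List (Option Int) × List Int), Grow st.1 (dfsAV adj fuel s st).1) := by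
  intro fuel
  induction fuel with
  | zero =>
    have hL : ∀ (s : Nat) (nbs : List Int) (st : List (Option Int) × List Int),
        Grow st.1 (dfsAL adj 0 s nbs st).1 := by
      intro s nbs
      induction nbs with
      | nil => intro st; rw [dfsAL_nil]; exact grow_refl _
      | cons v rest ih =>
        intro st
        by_cases hg : st.1.getD (pidx st.1.length v) (some 0) = none
        · rw [dfsAL_cons_zero _ _ _ _ _ hg]; exact grow_refl _
        · rw [dfsAL_cons_marked _ _ _ _ _ _ hg]; exact ih st
    exact ⟨hL, fun s st => by rw [dfsAV_def]; exact hL s _ st⟩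
  | succ f ihf =>
    have hL : ∀ (s : Nat) (nbs : List Int) (st : List (Option Int) × List Int),
        Grow st.1 (dfsAL adj (f + 1) s nbs st).1 := by
      intro s nbs
      induction nbs with
      | nil => intro st; rw [dfsAL_nil]; exact grow_refl _
      | cons v rest ih =>
        intro st
        by_cases hg : st.1.getD (pidx st.1.length v) (some 0) = none
        · rw [dfsAL_cons_new _ _ _ _ _ _ hg]
          exact grow_trans (grow_trans (grow_set _ _ _) (ihf.2 _ _)) (ih _)
        · rw [dfsAL_cons_marked _ _ _ _ _ _ hg]; exact ih st
    exact ⟨hL, fun s st => by rw [dfsAV_def]; exact hL s _ st⟩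

lemma dfsAV_grow (adj : List (List Int)) (fuel s : Nat) (st : List (Option Int) × List Int) :
    Grow st.1 (dfsAV adj fuel s st).1 := (dfsA_grow adj fuel).2 s st

-- soundness: everything the dfs marks is old or reachable
lemma dfsA_sound (adj : List (List Int)) {n : Nat} (hwf : WfAdj adj n)
    (m0 : Nat → Bool) (r : Nat) : ∀ fuel : Nat,
    (∀ (s : Nat) (nbs : List Int) (st : List (Option Int) × List Int),
      nbs ⊆ adj.getD s [] →
      Reach adj m0 r s → m0 s = false →
      (∀ v, m0 v = true → MA st.1 v = true) →
      (∀ v, MA st.1 v = true → m0 v = true ∨ Reach adj m0 r v) →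
      (∀ v, MA (dfsAL adj fuel s nbs st).1 v = true → m0 v = true ∨ Reach adj m0 r v)) ∧
    (∀ (s : Nat) (st : List (Option Int) × List Int),
      Reach adj m0 r s → m0 s = false →
      (∀ v, m0 v = true → MA st.1 v = true) →
      (∀ v, MA st.1 v = true → m0 v = true ∨ Reach adj m0 r v) →
      (∀ v, MA (dfsAV adj fuel s st).1 v = true → m0 v = true ∨ Reach adj m0 r v)) := by
  intro fuel
  induction fuel with
  | zero =>
    have hL : ∀ (s : Nat) (nbs : List Int) (st : List (Option Int) × List Int),
        nbs ⊆ adj.getD s [] → Reach adj m0 r s → m0 s = false →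
        (∀ v, m0 v = true → MA st.1 v = true) →
        (∀ v, MA st.1 v = true → m0 v = true ∨ Reach adj m0 r v) →
        (∀ v, MA (dfsAL adj 0 s nbs st).1 v = true → m0 v = true ∨ Reach adj m0 r v) := by
      intro s nbs
      induction nbs with
      | nil => intro st _ _ _ _ hs; rw [dfsAL_nil]; exact hs
      | cons v rest ih =>
        intro st hsub hr hm0 hlow hst
        by_cases hg : st.1.getD (pidx st.1.length v) (some 0) = none
        · rw [dfsAL_cons_zero _ _ _ _ _ hg]; exact hst
        · rw [dfsAL_cons_marked _ _ _ _ _ _ hg]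
          exact ih st (fun e he => hsub (List.mem_cons_of_mem _ he)) hr hm0 hlow hst
    exact ⟨hL, fun s st hr hm0 hlow hst => by
      rw [dfsAV_def]; exact hL s _ st (fun e he => he) hr hm0 hlow hst⟩
  | succ f ihf =>
    have hL : ∀ (s : Nat) (nbs : List Int) (st : List (Option Int) × List Int),
        nbs ⊆ adj.getD s [] → Reach adj m0 r s → m0 s = false →
        (∀ v, m0 v = true → MA st.1 v = true) →
        (∀ v, MA st.1 v = true → m0 v = true ∨ Reach adj m0 r v) →
        (∀ v, MA (dfsAL adj (f + 1) s nbs st).1 v = true → m0 v = true ∨ Reach adj m0 r v) := by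
      intro s nbs
      induction nbs with
      | nil => intro st _ _ _ _ hs; rw [dfsAL_nil]; exact hs
      | cons v rest ih =>
        intro st hsub hr hm0 hlow hst
        by_cases hg : st.1.getD (pidx st.1.length v) (some 0) = none
        · rw [dfsAL_cons_new _ _ _ _ _ _ hg]
          have hv : v ∈ adj.getD s [] := hsub (List.mem_cons_self ..)
          have hv0 : 0 ≤ v := (wf_edge hwf hv).1
          have hvn : pidx st.1.length v = v.toNat := pidx_nonneg _ _ hv0
          obtain ⟨hgl, hgm⟩ := (guardA_iff _ _).mp hg
          have hedge : ((v.toNat : Nat) : Int) ∈ adj.getD s [] := by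
            rw [(wf_edge_toNat hwf hv).2]; exact hv
          have hRvn : Reach adj m0 r v.toNat := Reach.step hr hm0 hedge
          have hm0vn : m0 v.toNat = false := by
            by_contra hc
            have := hlow v.toNat (by simpa using hc)
            rw [hvn] at hgm
            rw [this] at hgm
            exact Bool.noConfusion hgm
          set st1 := (st.1.set (pidx st.1.length v) (some (s : Int)), st.2) with hst1
          have hset : ∀ w, MA st1.1 w = true → m0 w = true ∨ Reach adj m0 r w := by
            intro w hw
            rw [hst1] at hw
            simp only [MA_set] at hw
            split at hw
            · rename_i hcond
              rw [hvn] at hcond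
              exact Or.inr (hcond.1 ▸ hRvn)
            · exact hst w hw
          have hsetlow : ∀ w, m0 w = true → MA st1.1 w = true :=
            fun w hw => (grow_set st.1 _ _).2 w (hlow w hw)
          have hV := (ihf).2 (pidx st.1.length v) st1 (hvn ▸ hRvn) (hvn ▸ hm0vn) hsetlow hset
          have hVlow : ∀ w, m0 w = true → MA (dfsAV adj f (pidx st.1.length v) st1).1 w = true :=
            fun w hw => (dfsAV_grow adj f _ st1).2 w (hsetlow w hw)
          exact ih _ (fun e he => hsub (List.mem_cons_of_mem _ he)) hr hm0 hVlow hV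
        · rw [dfsAL_cons_marked _ _ _ _ _ _ hg]
          exact ih st (fun e he => hsub (List.mem_cons_of_mem _ he)) hr hm0 hlow hst
    exact ⟨hL, fun s st hr hm0 hlow hst => by
      rw [dfsAV_def]; exact hL s _ st (fun e he => he) hr hm0 hlow hst⟩
lemma MA_false_getD {p : List (Option Int)} {v : Nat} (hv : v < p.length)
    (h : MA p v = false) : p.getD v none = none := by
  rw [MA_get _ _ hv] at h
  rw [List.getD_eq_getElem _ _ hv]
  exact Option.not_isSome_iff_eq_none.mp (by simp [h])

lemma dfsA_post (adj : List (List Int)) {n : Nat} (hwf : WfAdj adj n) : ∀ fuel : Nat,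
    (∀ (s : Nat) (nbs : List Int) (st : List (Option Int) × List Int),
      nbs ⊆ adj.getD s [] → st.1.length = n → ncA st.1 < fuel →
      (∀ e ∈ nbs, MA (dfsAL adj fuel s nbs st).1 e.toNat = true) ∧
      (∀ u, MA st.1 u = false → MA (dfsAL adj fuel s nbs st).1 u = true →
        ∀ e ∈ adj.getD u [], MA (dfsAL adj fuel s nbs st).1 e.toNat = true)) ∧
    (∀ (s : Nat) (st : List (Option Int) × List Int),
      st.1.length = n → ncA st.1 < fuel →
      (∀ e ∈ adj.getD s [], MA (dfsAV adj fuel s st).1 e.toNat = true) ∧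
      (∀ u, MA st.1 u = false → MA (dfsAV adj fuel s st).1 u = true →
        ∀ e ∈ adj.getD u [], MA (dfsAV adj fuel s st).1 e.toNat = true)) := by
  intro fuel
  induction fuel with
  | zero =>
    exact ⟨fun s nbs st _ _ h => absurd h (Nat.not_lt_zero _),
      fun s st _ h => absurd h (Nat.not_lt_zero _)⟩
  | succ f ihf =>
    have hL : ∀ (s : Nat) (nbs : List Int) (st : List (Option Int) × List Int),
        nbs ⊆ adj.getD s [] → st.1.length = n → ncA st.1 < f + 1 →
        (∀ e ∈ nbs, MA (dfsAL adj (f + 1) s nbs st).1 e.toNat = true) ∧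
        (∀ u, MA st.1 u = false → MA (dfsAL adj (f + 1) s nbs st).1 u = true →
          ∀ e ∈ adj.getD u [], MA (dfsAL adj (f + 1) s nbs st).1 e.toNat = true) := by
      intro s nbs
      induction nbs with
      | nil =>
        intro st _ _ _
        rw [dfsAL_nil]
        exact ⟨fun e he => absurd he (List.not_mem_nil), fun u hu hu' => absurd hu' (hu ▸ Bool.noConfusion)⟩
      | cons v rest ih =>
        intro st hsub hlen hfuel
        have hv : v ∈ adj.getD s [] := hsub (List.mem_cons_self ..)
        have hv0 : 0 ≤ v := (wf_edge hwf hv).1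
        have hvn : pidx st.1.length v = v.toNat := pidx_nonneg _ _ hv0
        by_cases hg : st.1.getD (pidx st.1.length v) (some 0) = none
        · rw [dfsAL_cons_new _ _ _ _ _ _ hg]
          obtain ⟨hgl, hgm⟩ := (guardA_iff _ _).mp hg
          set vn := pidx st.1.length v with hvndef
          set st1 := (st.1.set vn (some (s : Int)), st.2) with hst1
          set st2 := dfsAV adj f vn st1 with hst2
          have hlen1 : st1.1.length = n := by rw [hst1]; simpa [List.length_set] using hlen
          have hnc1 : ncA st1.1 < ncA st.1 :=
            ncA_set_lt _ _ _ hgl (MA_false_getD hgl hgm)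
          have hg12 : Grow st1.1 st2.1 := dfsAV_grow adj f vn st1
          have hlen2 : st2.1.length = n := by rw [hg12.1]; exact hlen1
          have hnc2 : ncA st2.1 < f + 1 := by
            have := ncA_mono st1.1 st2.1 hg12.1 hg12.2
            omega
          have hfuel1 : ncA st1.1 < f := by omega
          have hV := ihf.2 vn st1 hlen1 hfuel1
          have hIH := ih st2 (fun e he => hsub (List.mem_cons_of_mem _ he)) hlen2 hnc2
          have hg2r : Grow st2.1 (dfsAL adj (f + 1) s rest st2).1 := (dfsA_grow adj (f + 1)).1 s rest st2
          have hmark1 : MA st1.1 vn = true := by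
            rw [hst1]
            simp [MA_set, hgl]
          refine ⟨?_, ?_⟩
          · intro e he
            rcases List.mem_cons.mp he with rfl | he'
            · exact hg2r.2 _ (hg12.2 _ (hvn ▸ hmark1))
            · exact hIH.1 e he'
          · intro u hu hres e he
            by_cases h2 : MA st2.1 u = true
            · by_cases huv : u = vn
              · subst huv
                exact hg2r.2 _ (hV.1 e he)
              · have h1 : MA st1.1 u = false := by
                  have hcond : ¬ (vn = u ∧ vn < st.1.length) := fun hc => huv hc.1.symm
                  rw [hst1]
                  simp only [MA_set, if_neg hcond]
                  exact hu
                exact hg2r.2 _ (hV.2 u h1 h2 e he)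
            · exact hIH.2 u (by simpa using h2) hres e he
        · rw [dfsAL_cons_marked _ _ _ _ _ _ hg]
          have hIH := ih st (fun e he => hsub (List.mem_cons_of_mem _ he)) hlen hfuel
          refine ⟨?_, hIH.2⟩
          intro e he
          rcases List.mem_cons.mp he with rfl | he'
          · have hmm : MA st.1 (pidx st.1.length e) = true := by
              rcases Bool.eq_false_or_eq_true (MA st.1 (pidx st.1.length e)) with h | h
              · exact h
              · exact absurd ((guardA_iff _ _).mpr ⟨by rw [pidx_nonneg _ _ hv0]; rw [hlen]; exact (wf_edge_toNat hwf hv).1, h⟩) hg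
            exact ((dfsA_grow adj (f+1)).1 s rest st).2 _ (by rw [← pidx_nonneg st.1.length _ hv0]; exact hmm)
          · exact hIH.1 e he'
    exact ⟨hL, fun s st hlen hfuel => by
      rw [dfsAV_def]
      exact hL s _ st (fun e he => he) hlen hfuel⟩
lemma charA (adj : List (List Int)) {n : Nat} (hwf : WfAdj adj n) (m0 : Nat → Bool)
    (p : List (Option Int)) (ord : List Int) (s : Nat) (x : Int)
    (hs : s < n) (hlen : p.length = n) (hm : ∀ v, MA p v = m0 v) (hm0s : m0 s = false) :
    ∀ w, MA (dfsAV adj (n + 1) s (p.set s (some x), ord)).1 w = true ↔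
      (m0 w = true ∨ Reach adj m0 s w) := by
  set st1 : List (Option Int) × List Int := (p.set s (some x), ord) with hst1
  have hsp : s < p.length := by rw [hlen]; exact hs
  have hlen1 : st1.1.length = n := by rw [hst1]; simpa [List.length_set] using hlen
  have hfuel : ncA st1.1 < n + 1 := by
    have := ncA_le st1.1
    omega
  have hmark : MA st1.1 s = true := by
    rw [hst1]; simp [MA_set, hsp]
  have hstm : ∀ v, MA st1.1 v = true → m0 v = true ∨ Reach adj m0 s v := by
    intro v hv
    rw [hst1] at hv
    rw [MA_set] at hv
    split at hv
    · rename_i hc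
      exact Or.inr (hc.1 ▸ Reach.refl)
    · exact Or.inl ((hm v) ▸ hv)
  have hlow : ∀ v, m0 v = true → MA st1.1 v = true := by
    intro v hv
    by_cases hvs : v = s
    · exact hvs ▸ hmark
    · rw [hst1]
      rw [MA_set, if_neg (fun hc => hvs hc.1.symm)]
      rw [hm v]; exact hv
  intro w
  constructor
  · exact fun h => (dfsA_sound adj hwf m0 s (n + 1)).2 s st1 Reach.refl hm0s hlow hstm w h
  · intro h
    rcases h with h | h
    · exact (dfsAV_grow adj (n + 1) s st1).2 w (hlow w h)
    · have hpost := (dfsA_post adj hwf (n + 1)).2 s st1 hlen1 hfuel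
      induction h with
      | refl => exact (dfsAV_grow adj (n + 1) s st1).2 s hmark
      | step hru hm0u hedge ihw =>
        rename_i u w'
        have hres := ihw
        by_cases hus : u = s
        · subst hus
          have := hpost.1 _ hedge
          simpa using this
        · have h1 : MA st1.1 u = false := by
            rw [hst1]
            rw [MA_set, if_neg (fun hc => hus hc.1.symm)]
            rw [hm u]; exact hm0u
          have := hpost.2 u h1 hres _ hedge
          simpa using this
def pushStep (p : List Bool × List Int) (w : Int) : List Bool × List Int :=
  let wn := pidx p.1.length w
  if p.1.getD wn true = false then (p.1.set wn true, w :: p.2) else p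

lemma stackB_nil (adj : List (List Int)) (fuel : Nat) (vis : List Bool) :
    stackB adj fuel [] vis = vis := by cases fuel <;> rw [stackB]

lemma stackB_zero (adj : List (List Int)) (u : Int) (stk : List Int) (vis : List Bool) :
    stackB adj 0 (u :: stk) vis = vis := by rw [stackB]

lemma stackB_succ (adj : List (List Int)) (f : Nat) (u : Int) (stk : List Int) (vis : List Bool) :
    stackB adj (f + 1) (u :: stk) vis =
      stackB adj f ((adj.getD (pidx vis.length u) []).foldl pushStep (vis, stk)).2
        ((adj.getD (pidx vis.length u) []).foldl pushStep (vis, stk)).1 := by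
  rw [stackB]
  rfl

lemma fold_facts : ∀ (nbs : List Int) (vis : List Bool) (stk : List Int),
    (∀ e ∈ nbs, 0 ≤ e ∧ e < (vis.length : Int)) →
    (nbs.foldl pushStep (vis, stk)).1.length = vis.length ∧
    (∀ v, MB vis v = true → MB (nbs.foldl pushStep (vis, stk)).1 v = true) ∧
    (∀ x ∈ stk, x ∈ (nbs.foldl pushStep (vis, stk)).2) ∧
    (∀ x ∈ (nbs.foldl pushStep (vis, stk)).2, x ∈ stk ∨
      (x ∈ nbs ∧ MB vis x.toNat = false ∧ MB (nbs.foldl pushStep (vis, stk)).1 x.toNat = true)) ∧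
    (∀ v, MB (nbs.foldl pushStep (vis, stk)).1 v = true →
      MB vis v = true ∨ (v : Int) ∈ (nbs.foldl pushStep (vis, stk)).2) ∧
    (∀ e ∈ nbs, MB (nbs.foldl pushStep (vis, stk)).1 e.toNat = true) ∧
    ((nbs.foldl pushStep (vis, stk)).2.length + fcB (nbs.foldl pushStep (vis, stk)).1 =
      stk.length + fcB vis) := by
  intro nbs
  induction nbs with
  | nil =>
    intro vis stk _
    exact ⟨rfl, fun _ h => h, fun x hx => hx, fun x hx => Or.inl hx, fun v hv => Or.inl hv,
      fun e he => absurd he (List.not_mem_nil), rfl⟩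
  | cons w rest ih =>
    intro vis stk hwf
    have hw := hwf w (List.mem_cons_self ..)
    have hwn : pidx vis.length w = w.toNat := pidx_nonneg _ _ hw.1
    have hwlt : w.toNat < vis.length := by omega
    have hwcast : ((w.toNat : Nat) : Int) = w := by omega
    simp only [List.foldl_cons]
    by_cases hg : vis.getD (pidx vis.length w) true = false
    · have hstep : pushStep (vis, stk) w = (vis.set (pidx vis.length w) true, w :: stk) := by
        simp only [pushStep]
        rw [if_pos hg]
      rw [hstep]
      set vis' := vis.set (pidx vis.length w) true with hvis'
      have hlen' : vis'.length = vis.length := by rw [hvis']; exact List.length_set ..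
      have hwf' : ∀ e ∈ rest, 0 ≤ e ∧ e < (vis'.length : Int) := by
        intro e he
        rw [hlen']
        exact hwf e (List.mem_cons_of_mem _ he)
      obtain ⟨C1, C2, C3, C4, C5, C6, C7⟩ := ih vis' (w :: stk) hwf'
      have hmb : MB vis w.toNat = false := ((guardB_iff _ _).mp (hwn ▸ hg)).2
      have hmark' : MB vis' w.toNat = true := by
        rw [hvis', hwn]
        simp [MB_set, hwlt]
      have hmono : ∀ v, MB vis v = true → MB vis' v = true := by
        intro v hv
        rw [hvis']
        rw [MB_set]
        split
        · rfl
        · exact hv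
      refine ⟨C1.trans hlen', fun v hv => C2 v (hmono v hv), ?_, ?_, ?_, ?_, ?_⟩
      · exact fun x hx => C3 x (List.mem_cons_of_mem _ hx)
      · intro x hx
        rcases C4 x hx with hx' | hx'
        · rcases List.mem_cons.mp hx' with rfl | hx''
          · exact Or.inr ⟨List.mem_cons_self .., hmb, C2 _ hmark'⟩
          · exact Or.inl hx''
        · refine Or.inr ⟨List.mem_cons_of_mem _ hx'.1, ?_, hx'.2.2⟩
          by_contra hc
          have h1 : MB vis x.toNat = true := by simpa using hc
          have h2 := hmono _ h1
          rw [hx'.2.1] at h2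
          exact Bool.noConfusion h2
      · intro v hv
        rcases C5 v hv with hv' | hv'
        · rw [hvis', MB_set] at hv'
          split at hv'
          · rename_i hc
            rw [hwn] at hc
            have hveq : (v : Int) = w := by rw [← hc.1]; exact hwcast
            exact Or.inr (by rw [hveq]; exact C3 w (List.mem_cons_self ..))
          · exact Or.inl hv'
        · exact Or.inr hv'
      · intro e he
        rcases List.mem_cons.mp he with rfl | he'
        · exact C2 _ hmark'
        · exact C6 e he'
      · have hfc : fcB vis' + 1 = fcB vis := by
          rw [hvis', hwn]
          exact fcB_set vis w.toNat hwlt hmb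
        simp only [List.length_cons] at C7
        omega
    · have hstep : pushStep (vis, stk) w = (vis, stk) := by
        simp only [pushStep]
        rw [if_neg hg]
      rw [hstep]
      have hwfr : ∀ e ∈ rest, 0 ≤ e ∧ e < (vis.length : Int) :=
        fun e he => hwf e (List.mem_cons_of_mem _ he)
      obtain ⟨C1, C2, C3, C4, C5, C6, C7⟩ := ih vis stk hwfr
      have hmarked : MB vis w.toNat = true := by
        rcases Bool.eq_false_or_eq_true (MB vis w.toNat) with h | h
        · exact h
        · exact absurd ((guardB_iff _ _).mpr ⟨hwn ▸ hwlt, hwn ▸ h⟩) (hwn ▸ hg)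
      refine ⟨C1, C2, C3, ?_, C5, ?_, C7⟩
      · intro x hx
        rcases C4 x hx with h | h
        · exact Or.inl h
        · exact Or.inr ⟨List.mem_cons_of_mem _ h.1, h.2⟩
      · intro e he
        rcases List.mem_cons.mp he with rfl | he'
        · exact C2 _ hmarked
        · exact C6 e he'
def GrowB (p q : List Bool) : Prop :=
  q.length = p.length ∧ ∀ v, MB p v = true → MB q v = true

lemma fcB_le (vis : List Bool) : fcB vis ≤ vis.length := List.countP_le_length

lemma wf_row {adj : List (List Int)} {n : Nat} (hwf : WfAdj adj n) {vis : List Bool}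
    (hlen : vis.length = n) (u : Nat) :
    ∀ e ∈ adj.getD u [], 0 ≤ e ∧ e < (vis.length : Int) := by
  intro e he
  rw [hlen]
  exact wf_edge hwf he

lemma stackB_grow (adj : List (List Int)) {n : Nat} (hwf : WfAdj adj n) :
    ∀ (fuel : Nat) (stack : List Int) (vis : List Bool), vis.length = n →
      GrowB vis (stackB adj fuel stack vis) := by
  intro fuel
  induction fuel with
  | zero =>
    intro stack vis _
    cases stack with
    | nil => rw [stackB_nil]; exact ⟨rfl, fun _ h => h⟩
    | cons u stk => rw [stackB_zero]; exact ⟨rfl, fun _ h => h⟩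
  | succ f ih =>
    intro stack vis hlen
    cases stack with
    | nil => rw [stackB_nil]; exact ⟨rfl, fun _ h => h⟩
    | cons u stk =>
      rw [stackB_succ]
      obtain ⟨C1, C2, _, _, _, _, _⟩ :=
        fold_facts (adj.getD (pidx vis.length u) []) vis stk (wf_row hwf hlen _)
      set p := (adj.getD (pidx vis.length u) []).foldl pushStep (vis, stk) with hp
      have hrec := ih p.2 p.1 (C1.trans hlen)
      exact ⟨by rw [hrec.1, C1], fun v hv => hrec.2 v (C2 v hv)⟩

lemma stackB_sound (adj : List (List Int)) {n : Nat} (hwf : WfAdj adj n)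
    (m0 : Nat → Bool) (r : Nat) :
    ∀ (fuel : Nat) (stack : List Int) (vis : List Bool),
      vis.length = n →
      (∀ x ∈ stack, 0 ≤ x ∧ m0 x.toNat = false ∧ Reach adj m0 r x.toNat) →
      (∀ v, m0 v = true → MB vis v = true) →
      (∀ v, MB vis v = true → m0 v = true ∨ Reach adj m0 r v) →
      ∀ v, MB (stackB adj fuel stack vis) v = true → m0 v = true ∨ Reach adj m0 r v := by
  intro fuel
  induction fuel with
  | zero =>
    intro stack vis _ _ _ hvis v
    cases stack with
    | nil => rw [stackB_nil]; exact hvis v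
    | cons u stk => rw [stackB_zero]; exact hvis v
  | succ f ih =>
    intro stack vis hlen hstk hm0sub hvis v
    cases stack with
    | nil => rw [stackB_nil]; exact hvis v
    | cons u stk =>
      rw [stackB_succ]
      obtain ⟨hu0, hum0, hur⟩ := hstk u (List.mem_cons_self ..)
      have hun : pidx vis.length u = u.toNat := pidx_nonneg _ _ hu0
      obtain ⟨C1, C2, C3, C4, C5, C6, C7⟩ :=
        fold_facts (adj.getD (pidx vis.length u) []) vis stk (wf_row hwf hlen _)
      have hstk' : ∀ x ∈ ((adj.getD (pidx vis.length u) []).foldl pushStep (vis, stk)).2,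
          0 ≤ x ∧ m0 x.toNat = false ∧ Reach adj m0 r x.toNat := by
        intro x hx
        rcases C4 x hx with hx' | hx'
        · exact hstk x (List.mem_cons_of_mem _ hx')
        · have hx0 : 0 ≤ x := by
            rw [hun] at hx'
            exact (wf_edge hwf hx'.1).1
          refine ⟨hx0, ?_, ?_⟩
          · by_contra hc
            have := hm0sub x.toNat (by simpa using hc)
            rw [hx'.2.1] at this
            exact Bool.noConfusion this
          · refine Reach.step hur hum0 ?_
            rw [hun] at hx'
            have : ((x.toNat : Nat) : Int) = x := by omega
            rw [this]
            exact hx'.1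
      refine ih _ _ (C1.trans hlen) hstk' (fun w hw => C2 w (hm0sub w hw)) ?_ v
      intro w hw
      rcases C5 w hw with hw' | hw'
      · exact hvis w hw'
      · have := (hstk' _ hw').2.2
        simpa using Or.inr this

lemma stackB_complete (adj : List (List Int)) {n : Nat} (hwf : WfAdj adj n) (m0 : Nat → Bool) :
    ∀ (fuel : Nat) (stack : List Int) (vis : List Bool),
      vis.length = n → stack.length + fcB vis < fuel →
      (∀ x ∈ stack, 0 ≤ x) →
      (∀ u, MB vis u = true → m0 u = false → (u : Int) ∉ stack →
        ∀ e ∈ adj.getD u [], MB vis e.toNat = true) →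
      (∀ u, MB (stackB adj fuel stack vis) u = true → m0 u = false →
        ∀ e ∈ adj.getD u [], MB (stackB adj fuel stack vis) e.toNat = true) := by
  intro fuel
  induction fuel with
  | zero => intro stack vis _ hf; omega
  | succ f ih =>
    intro stack vis hlen hf hstk hclosed
    cases stack with
    | nil =>
      rw [stackB_nil]
      exact fun u hu hm0u => hclosed u hu hm0u (List.not_mem_nil)
    | cons u stk =>
      rw [stackB_succ]
      have hu0 : 0 ≤ u := hstk u (List.mem_cons_self ..)
      have hun : pidx vis.length u = u.toNat := pidx_nonneg _ _ hu0
      obtain ⟨C1, C2, C3, C4, C5, C6, C7⟩ :=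
        fold_facts (adj.getD (pidx vis.length u) []) vis stk (wf_row hwf hlen _)
      refine ih _ _ (C1.trans hlen) (by simp only [List.length_cons] at hf; omega) ?_ ?_
      · intro x hx
        rcases C4 x hx with hx' | hx'
        · exact hstk x (List.mem_cons_of_mem _ hx')
        · rw [hun] at hx'
          exact (wf_edge hwf hx'.1).1
      · intro w hw hm0w hwnot
        by_cases hvw : MB vis w = true
        · by_cases hwu : (w : Int) = u
          · intro e he
            apply C6
            have : w = u.toNat := by omega
            rw [hun, ← this]
            exact he
          · have hnot : (w : Int) ∉ (u :: stk) := by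
              intro hc
              rcases List.mem_cons.mp hc with hc' | hc'
              · exact hwu hc'
              · exact hwnot (C3 _ hc')
            exact fun e he => C2 _ (hclosed w hvw hm0w hnot e he)
        · rcases C5 w hw with hc | hc
          · exact absurd hc hvw
          · exact absurd hc hwnot

lemma charB (adj : List (List Int)) {n : Nat} (hwf : WfAdj adj n) (m0 : Nat → Bool)
    (vis : List Bool) (r : Nat)
    (hr : r < n) (hlen : vis.length = n) (hm : ∀ v, MB vis v = m0 v) (hm0r : m0 r = false) :
    ∀ w, MB (stackB adj (n + 2) [(r : Int)] (vis.set r true)) w = true ↔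
      (m0 w = true ∨ Reach adj m0 r w) := by
  set vis1 := vis.set r true with hvis1
  have hrp : r < vis.length := by rw [hlen]; exact hr
  have hlen1 : vis1.length = n := by rw [hvis1]; simpa [List.length_set] using hlen
  have hfuel : (1 : Nat) + fcB vis1 < n + 2 := by
    have := fcB_le vis1
    omega
  have hmark : MB vis1 r = true := by
    rw [hvis1]; simp [MB_set, hrp]
  have hmono1 : ∀ v, MB vis v = true → MB vis1 v = true := by
    intro v hv
    rw [hvis1, MB_set]
    split
    · rfl
    · exact hv
  have hvism : ∀ v, MB vis1 v = true → m0 v = true ∨ Reach adj m0 r v := by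
    intro v hv
    rw [hvis1, MB_set] at hv
    split at hv
    · rename_i hc
      exact Or.inr (hc.1 ▸ Reach.refl)
    · exact Or.inl ((hm v) ▸ hv)
  have hlow : ∀ v, m0 v = true → MB vis1 v = true := by
    intro v hv
    by_cases hvs : v = r
    · exact hvs ▸ hmark
    · rw [hvis1, MB_set, if_neg (fun hc => hvs hc.1.symm), hm v]
      exact hv
  have hgrow := stackB_grow adj hwf (n + 2) [(r : Int)] vis1 hlen1
  intro w
  constructor
  · refine stackB_sound adj hwf m0 r (n + 2) [(r : Int)] vis1 hlen1 ?_ hlow hvism w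
    intro x hx
    rcases List.mem_cons.mp hx with rfl | hx'
    · exact ⟨by omega, by simpa using hm0r, by simpa using (Reach.refl : Reach adj m0 r r)⟩
    · exact absurd hx' (List.not_mem_nil)
  · intro h
    have hclosed0 : ∀ u, MB vis1 u = true → m0 u = false → (u : Int) ∉ [(r : Int)] →
        ∀ e ∈ adj.getD u [], MB vis1 e.toNat = true := by
      intro u hu hm0u hnot
      exfalso
      have hur : u ≠ r := by
        intro hc
        exact hnot (by rw [hc]; exact List.mem_cons_self ..)
      rw [hvis1, MB_set, if_neg (fun hc => hur hc.1.symm), hm u] at hu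
      rw [hm0u] at hu
      exact Bool.noConfusion hu
    have hcomp := stackB_complete adj hwf m0 (n + 2) [(r : Int)] vis1 hlen1
      (by simpa using hfuel) (by intro x hx; rcases List.mem_cons.mp hx with rfl | hx'
                                 · omega
                                 · exact absurd hx' (List.not_mem_nil)) hclosed0
    rcases h with h | h
    · exact hgrow.2 w (hlow w h)
    · induction h with
      | refl => exact hgrow.2 r hmark
      | step hru hm0u hedge ihw =>
        rename_i u w'
        have := hcomp u ihw hm0u _ hedge
        simpa using this
lemma bool_eq_of_iff {a b : Bool} (h : a = true ↔ b = true) : a = b := by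
  cases a <;> cases b <;> simp_all

lemma inner_len (n : Nat) (x : Int) : ∀ (l : List Int) (r : List (List Int)),
    (l.foldl (fun r s => r.set (pidx n s) (r.getD (pidx n s) [] ++ [x])) r).length = r.length := by
  intro l
  induction l with
  | nil => intro r; rfl
  | cons s rest ih =>
    intro r
    rw [List.foldl_cons, ih, List.length_set]

lemma inner_pred (n : Nat) (m : Nat) (x : Int) (hx : 0 ≤ x ∧ x < (m : Int)) :
    ∀ (l : List Int) (r : List (List Int)),
    (∀ u : Nat, ∀ e ∈ r.getD u [], 0 ≤ e ∧ e < (m : Int)) →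
    (∀ u : Nat, ∀ e ∈ (l.foldl (fun r s => r.set (pidx n s) (r.getD (pidx n s) [] ++ [x])) r).getD u [],
      0 ≤ e ∧ e < (m : Int)) := by
  intro l
  induction l with
  | nil => intro r h; exact h
  | cons s rest ih =>
    intro r h
    rw [List.foldl_cons]
    refine ih _ ?_
    intro u e he
    rw [getD_set] at he
    split at he
    · rcases List.mem_append.mp he with he' | he'
      · exact h _ _ he'
      · rw [List.mem_singleton.mp he']
        exact hx
    · exact h _ _ he

lemma revEdges_wf (Adj : List (List Int)) : WfAdj (revEdges Adj) Adj.length := by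
  rw [revEdges]
  constructor
  · have houter : ∀ (l : List Nat) (r0 : List (List Int)),
        (l.foldl (fun r v => (Adj.getD v []).foldl
          (fun r s => r.set (pidx Adj.length s) (r.getD (pidx Adj.length s) [] ++ [(v : Int)])) r)
          r0).length = r0.length := by
      intro l
      induction l with
      | nil => intro r0; rfl
      | cons v rest ih =>
        intro r0
        rw [List.foldl_cons, ih, inner_len]
    rw [houter]
    exact List.length_replicate
  · have hgen : ∀ (l : List Nat), (∀ v ∈ l, v < Adj.length) →
        ∀ (r : List (List Int)),
        (∀ u : Nat, ∀ e ∈ r.getD u [], 0 ≤ e ∧ e < (Adj.length : Int)) →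
        (∀ u : Nat, ∀ e ∈ (l.foldl (fun r v => (Adj.getD v []).foldl
            (fun r s => r.set (pidx Adj.length s) (r.getD (pidx Adj.length s) [] ++ [(v : Int)])) r)
            r).getD u [], 0 ≤ e ∧ e < (Adj.length : Int)) := by
      intro l
      induction l with
      | nil => intro _ r h; exact h
      | cons v rest ih =>
        intro hmem r h
        rw [List.foldl_cons]
        refine ih (fun w hw => hmem w (List.mem_cons_of_mem _ hw)) _ ?_
        refine inner_pred Adj.length Adj.length ((v : Int)) ?_ _ _ h
        have := hmem v (List.mem_cons_self ..)
        omega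
    refine hgen _ (fun v hv => List.mem_range.mp hv) _ ?_
    intro u e he
    have : u < Adj.length ∨ ¬ u < Adj.length := em _
    rcases this with h | h
    · rw [List.getD_eq_getElem _ _ (by simpa using h)] at he
      simp at he
    · rw [List.getD_eq_default _ _ (by simpa using not_lt.mp h)] at he
      exact absurd he (List.not_mem_nil)

lemma loop1 (adj : List (List Int)) (n : Nat) (hwf : WfAdj adj n) :
    ∀ (l : List Nat), (∀ v ∈ l, v < n) →
    ∀ (st : List (Option Int) × List Int) (p : List Bool × Int),
      st.1.length = n → p.1.length = n →
      (∀ v, MA st.1 v = MB p.1 v) →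
      (st.2.getLast? = (if p.2 = -1 then none else some p.2)) →
      (p.2 = -1 ∨ (0 ≤ p.2 ∧ p.2 < (n : Int))) →
      ((p.2 = -1) → ∀ v, MB p.1 v = false) →
      ((l.foldl (fun st v => if st.1.getD v (some 0) = none then
          dfsAV adj (n + 1) v (st.1.set v (some (v : Int)), st.2) else st) st).1.length = n) ∧
      ((l.foldl (fun p v => if p.1.getD v true = false then
          (stackB adj (n + 2) [(v : Int)] (p.1.set v true), (v : Int)) else p) p).1.length = n) ∧
      (∀ v, MA (l.foldl (fun st v => if st.1.getD v (some 0) = none then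
          dfsAV adj (n + 1) v (st.1.set v (some (v : Int)), st.2) else st) st).1 v =
        MB (l.foldl (fun p v => if p.1.getD v true = false then
          (stackB adj (n + 2) [(v : Int)] (p.1.set v true), (v : Int)) else p) p).1 v) ∧
      ((l.foldl (fun st v => if st.1.getD v (some 0) = none then
          dfsAV adj (n + 1) v (st.1.set v (some (v : Int)), st.2) else st) st).2.getLast? =
        (if (l.foldl (fun p v => if p.1.getD v true = false then
          (stackB adj (n + 2) [(v : Int)] (p.1.set v true), (v : Int)) else p) p).2 = -1 then none
         else some (l.foldl (fun p v => if p.1.getD v true = false then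
          (stackB adj (n + 2) [(v : Int)] (p.1.set v true), (v : Int)) else p) p).2)) ∧
      ((l.foldl (fun p v => if p.1.getD v true = false then
          (stackB adj (n + 2) [(v : Int)] (p.1.set v true), (v : Int)) else p) p).2 = -1 ∨
        (0 ≤ (l.foldl (fun p v => if p.1.getD v true = false then
          (stackB adj (n + 2) [(v : Int)] (p.1.set v true), (v : Int)) else p) p).2 ∧
         (l.foldl (fun p v => if p.1.getD v true = false then
          (stackB adj (n + 2) [(v : Int)] (p.1.set v true), (v : Int)) else p) p).2 < (n : Int))) ∧
      (((l.foldl (fun p v => if p.1.getD v true = false then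
          (stackB adj (n + 2) [(v : Int)] (p.1.set v true), (v : Int)) else p) p).2 = -1) →
        ∀ v, MB (l.foldl (fun p v => if p.1.getD v true = false then
          (stackB adj (n + 2) [(v : Int)] (p.1.set v true), (v : Int)) else p) p).1 v = false) ∧
      (∀ w, MB p.1 w = true → MB (l.foldl (fun p v => if p.1.getD v true = false then
          (stackB adj (n + 2) [(v : Int)] (p.1.set v true), (v : Int)) else p) p).1 w = true) ∧
      (∀ v ∈ l, MB (l.foldl (fun p v => if p.1.getD v true = false then
          (stackB adj (n + 2) [(v : Int)] (p.1.set v true), (v : Int)) else p) p).1 v = true) := by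
  intro l
  induction l with
  | nil =>
    intro _ st p h1 h2 h3 h4 h5 h6
    exact ⟨h1, h2, h3, h4, h5, h6, fun _ h => h, fun v hv => absurd hv (List.not_mem_nil)⟩
  | cons v l' ih =>
    intro hmem st p hlenA hlenB hmarks hord hrange hneg
    have hv : v < n := hmem v (List.mem_cons_self ..)
    have hvA : v < st.1.length := by rw [hlenA]; exact hv
    have hvB : v < p.1.length := by rw [hlenB]; exact hv
    simp only [List.foldl_cons]
    by_cases hmb : MB p.1 v = false
    · -- v is a fresh root in both programs
      have hma : MA st.1 v = false := by rw [hmarks v]; exact hmb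
      have hgA : st.1.getD v (some 0) = none := (guardA_iff _ _).mpr ⟨hvA, hma⟩
      have hgB : p.1.getD v true = false := (guardB_iff _ _).mpr ⟨hvB, hmb⟩
      rw [if_pos hgA, if_pos hgB]
      set stA' := dfsAV adj (n + 1) v (st.1.set v (some (v : Int)), st.2) with hstA'
      set pB' : List Bool × Int := (stackB adj (n + 2) [(v : Int)] (p.1.set v true), (v : Int))
        with hpB'
      have hchA := charA adj hwf (fun w => MA st.1 w) st.1 st.2 v (v : Int) hv hlenA
        (fun _ => rfl) hma
      have hchB := charB adj hwf (fun w => MA st.1 w) p.1 v hv hlenB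
        (fun u => (hmarks u).symm) hma
      have hmarks' : ∀ w, MA stA'.1 w = MB pB'.1 w := by
        intro w
        exact bool_eq_of_iff ((hchA w).trans (hchB w).symm)
      have hlenA' : stA'.1.length = n := by
        rw [hstA', (dfsAV_grow adj (n + 1) v _).1]
        simpa [List.length_set] using hlenA
      have hlenB' : pB'.1.length = n := by
        rw [hpB']
        rw [show (stackB adj (n + 2) [(v : Int)] (p.1.set v true), (v : Int)).1 =
          stackB adj (n + 2) [(v : Int)] (p.1.set v true) from rfl]
        rw [(stackB_grow adj hwf (n + 2) [(v : Int)] (p.1.set v true)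
          (by simpa [List.length_set] using hlenB)).1]
        simpa [List.length_set] using hlenB
      have hvne : ((v : Nat) : Int) ≠ -1 := by omega
      have hord' : stA'.2.getLast? = (if pB'.2 = -1 then none else some pB'.2) := by
        rw [hstA', hpB', dfsAV_def]
        rw [if_neg hvne]
        exact List.getLast?_concat
      have hrange' : pB'.2 = -1 ∨ (0 ≤ pB'.2 ∧ pB'.2 < (n : Int)) := by
        rw [hpB']
        right
        constructor
        · omega
        · omega
      have hneg' : (pB'.2 = -1) → ∀ w, MB pB'.1 w = false := by
        intro hc
        rw [hpB'] at hc
        exact absurd hc hvne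
      have hmono' : ∀ w, MB p.1 w = true → MB pB'.1 w = true := by
        intro w hw
        rw [hpB']
        refine (stackB_grow adj hwf (n + 2) [(v : Int)] (p.1.set v true)
          (by simpa [List.length_set] using hlenB)).2 w ?_
        rw [MB_set]
        split
        · rfl
        · exact hw
      have hmarkv' : MB pB'.1 v = true := by
        rw [hpB']
        refine (stackB_grow adj hwf (n + 2) [(v : Int)] (p.1.set v true)
          (by simpa [List.length_set] using hlenB)).2 v ?_
        simp [MB_set, hvB]
      obtain ⟨R1, R2, R3, R4, R5, R6, R7, R8⟩ :=
        ih (fun w hw => hmem w (List.mem_cons_of_mem _ hw)) stA' pB'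
          hlenA' hlenB' hmarks' hord' hrange' hneg'
      refine ⟨R1, R2, R3, R4, R5, R6, fun w hw => R7 w (hmono' w hw), ?_⟩
      intro w hw
      rcases List.mem_cons.mp hw with rfl | hw'
      · exact R7 w hmarkv'
      · exact R8 w hw'
    · -- v already visited: both sides skip
      have hmbt : MB p.1 v = true := by simpa using hmb
      have hma : ¬ st.1.getD v (some 0) = none := by
        rw [guardA_iff]
        rintro ⟨_, hc⟩
        rw [hmarks v] at hc
        rw [hc] at hmbt
        exact Bool.noConfusion hmbt
      have hgB : ¬ p.1.getD v true = false := by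
        rw [guardB_iff]
        rintro ⟨_, hc⟩
        rw [hc] at hmbt
        exact Bool.noConfusion hmbt
      rw [if_neg hma, if_neg hgB]
      obtain ⟨R1, R2, R3, R4, R5, R6, R7, R8⟩ :=
        ih (fun w hw => hmem w (List.mem_cons_of_mem _ hw)) st p
          hlenA hlenB hmarks hord hrange hneg
      refine ⟨R1, R2, R3, R4, R5, R6, R7, ?_⟩
      intro w hw
      rcases List.mem_cons.mp hw with rfl | hw'
      · exact R7 w hmbt
      · exact R8 w hw'
lemma MB_cons_succ (a : Bool) (p : List Bool) (v : Nat) :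
    MB (a :: p) (v + 1) = MB p v := by
  rw [MB, MB, List.getD_cons_succ]

lemma workA_foldl (np : List (Option Int)) : ∀ (l : List Nat) (b : Bool),
    ((l.foldl (fun w v => if np.getD v (some 0) = none then false else w) b) = true) ↔
      (b = true ∧ ∀ v ∈ l, ¬ np.getD v (some 0) = none) := by
  intro l
  induction l with
  | nil => intro b; simp
  | cons v l' ih =>
    intro b
    rw [List.foldl_cons]
    by_cases hg : np.getD v (some 0) = none
    · rw [if_pos hg, ih]
      constructor
      · rintro ⟨hc, _⟩
        exact absurd hc (by simp)
      · rintro ⟨_, hall⟩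
        exact absurd hg (hall v (List.mem_cons_self ..))
    · rw [if_neg hg, ih]
      constructor
      · rintro ⟨hb, hall⟩
        refine ⟨hb, fun w hw => ?_⟩
        rcases List.mem_cons.mp hw with rfl | hw'
        · exact hg
        · exact hall w hw'
      · rintro ⟨hb, hall⟩
        exact ⟨hb, fun w hw => hall w (List.mem_cons_of_mem _ hw)⟩

lemma allB_iff : ∀ (seen : List Bool),
    (seen.all (fun b => b) = true) ↔ (∀ v, v < seen.length → MB seen v = true) := by
  intro seen
  induction seen with
  | nil => simp
  | cons a t ih =>
    rw [List.all_cons, Bool.and_eq_true, ih]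
    constructor
    · rintro ⟨ha, ht⟩ v hv
      cases v with
      | zero => exact ha
      | succ w => rw [MB_cons_succ]; exact ht w (by simpa using hv)
    · intro h
      refine ⟨h 0 (by simp), fun w hw => ?_⟩
      have := h (w + 1) (by simpa using hw)
      rwa [MB_cons_succ] at this

-- ===== VERDICT =====
theorem find_meeting_point_spec : Claim_equal_find_meeting_point := by
  intro Adj _ hpre
  unfold Spec_find_meeting_point
  obtain ⟨hne, _⟩ := hpre
  have hn0 : 0 < Adj.length := List.length_pos_of_ne_nil hne
  have hwf : WfAdj (revEdges Adj) Adj.length := revEdges_wf Adj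
  have hlenadj : (revEdges Adj).length = Adj.length := hwf.1
  obtain ⟨R1, R2, R3, R4, R5, R6, R7, R8⟩ :=
    loop1 (revEdges Adj) Adj.length hwf (List.range Adj.length)
      (fun v hv => List.mem_range.mp hv)
      (List.replicate Adj.length (none : Option Int), ([] : List Int))
      (List.replicate Adj.length false, (-1 : Int))
      (by simp) (by simp) (fun v => by rw [MA_replicate, MB_replicate])
      (by simp) (Or.inl rfl) (fun _ v => MB_replicate Adj.length v)
  have h0mem : (0 : Nat) ∈ List.range Adj.length := List.mem_range.mpr hn0
  have hmark0 := R8 0 h0mem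
  have hne1 : (List.foldl (fun p v => if p.1.getD v true = false then
      (stackB (revEdges Adj) (Adj.length + 2) [(v : Int)] (p.1.set v true), (v : Int)) else p)
      (List.replicate Adj.length false, (-1 : Int)) (List.range Adj.length)).2 ≠ -1 := by
    intro hc
    have := R6 hc 0
    rw [this] at hmark0
    exact Bool.noConfusion hmark0
  simp only [find_meeting_point, find_meeting_point_alt]
  set FA := (List.foldl (fun st v => if st.1.getD v (some 0) = none then
      dfsAV (revEdges Adj) (Adj.length + 1) v (st.1.set v (some (v : Int)), st.2) else st)
      (List.replicate Adj.length (none : Option Int), ([] : List Int))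
      (List.range Adj.length)) with hFA
  set FB := (List.foldl (fun p v => if p.1.getD v true = false then
      (stackB (revEdges Adj) (Adj.length + 2) [(v : Int)] (p.1.set v true), (v : Int)) else p)
      (List.replicate Adj.length false, (-1 : Int)) (List.range Adj.length)) with hFB
  have hfull : fullDfsA (revEdges Adj) = FA := by rw [fullDfsA, hlenadj]
  rw [hfull, R4, if_neg hne1]
  dsimp only
  obtain ⟨hge, hlt⟩ := R5.resolve_left hne1
  set r := pidx Adj.length FB.2 with hr
  have hrval : r = FB.2.toNat := pidx_nonneg _ _ hge
  have hrn : r < Adj.length := by omega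
  have hcast : ((r : Nat) : Int) = FB.2 := by omega
  have htop : dfsATop (revEdges Adj) r = dfsAV (revEdges Adj) (Adj.length + 1) r
      ((List.replicate Adj.length (none : Option Int)).set r (some (r : Int)), []) := by
    rw [dfsATop, hlenadj]
  have hchA2 := charA (revEdges Adj) hwf (fun _ => false)
    (List.replicate Adj.length (none : Option Int)) [] r ((r : Nat) : Int) hrn
    (by simp) (fun v => MA_replicate _ v) rfl
  have hchB2 := charB (revEdges Adj) hwf (fun _ => false)
    (List.replicate Adj.length false) r hrn (by simp) (fun v => MB_replicate _ v) rfl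
  rw [hcast] at hchB2
  have hnp_len : (dfsATop (revEdges Adj) r).1.length = Adj.length := by
    rw [htop, (dfsAV_grow (revEdges Adj) (Adj.length + 1) r _).1]
    simp [List.length_set]
  have hseenlen : (stackB (revEdges Adj) (Adj.length + 2) [FB.2]
      ((List.replicate Adj.length false).set r true)).length = Adj.length := by
    rw [(stackB_grow (revEdges Adj) hwf (Adj.length + 2) [FB.2]
      ((List.replicate Adj.length false).set r true) (by simp [List.length_set])).1]
    simp [List.length_set]
  have hcond : ((List.range Adj.length).foldl (fun w v =>
      if (dfsATop (revEdges Adj) r).1.getD v (some 0) = none then false else w) true = true) ↔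
      ((stackB (revEdges Adj) (Adj.length + 2) [FB.2]
        ((List.replicate Adj.length false).set r true)).all (fun b => b) = true) := by
    rw [workA_foldl, allB_iff]
    constructor
    · rintro ⟨_, hall⟩ v hv
      rw [hseenlen] at hv
      have h1 := hall v (List.mem_range.mpr hv)
      have h2 : MA (dfsATop (revEdges Adj) r).1 v = true := by
        rcases Bool.eq_false_or_eq_true (MA (dfsATop (revEdges Adj) r).1 v) with h | h
        · exact h
        · exact absurd ((guardA_iff _ _).mpr ⟨by rw [hnp_len]; exact hv, h⟩) h1
      
      refine (hchB2 v).mpr ((hchA2 v).mp ?_)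
      rw [htop] at h2
      exact h2
    · intro hall
      refine ⟨rfl, fun v hv => ?_⟩
      have hvn := List.mem_range.mp hv
      have h2 := hall v (by rw [hseenlen]; exact hvn)
      have h3 : MA (dfsATop (revEdges Adj) r).1 v = true := by
        rw [htop]
        exact (hchA2 v).mpr ((hchB2 v).mp h2)
      rw [guardA_iff]
      rintro ⟨_, hc⟩
      rw [h3] at hc
      exact Bool.noConfusion hc
  rw [bool_eq_of_iff hcond]
  rw [if_neg hne1]
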